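-- pv_equiv track=rewrite | github.com/eballo/aoc | 2015/day11/day11.py | has_two_non_overlapping_pairs
-- ===== SOURCE A (Python) =====
-- def has_two_non_overlapping_pairs(password):
--     """ Check for at least two different, non-overlapping pairs of letters """
--     pairs = set()
--     i = 0
--     while i < len(password) - 1:
--         if password[i] == password[i + 1]:
--             pairs.add(password[i])
--             i += 2
--         else:
--             i += 1
--     return len(pairs) >= 2
-- ===== SOURCE B (Python) =====
-- import re
--
-- def has_two_non_overlapping_pairs(password):
--     """Check for at least two different, non-overlapping pairs of letters."""
--     return len(set(re.findall(r'([\s\S])\1', password))) >= 2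
-- ===== Notes on version B (the rewrite author's own statement) =====
-- stated objective: idiomatic
-- what changed: Replaces the manual index state machine (while loop with skip-by-2 bookkeeping and explicit set mutation) by one regex pass re.findall(r'([\s\S])\1', password), whose greedy non-overlapping matching yields the same repeated letters, then counts distinct matches.
import Mathlib
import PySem

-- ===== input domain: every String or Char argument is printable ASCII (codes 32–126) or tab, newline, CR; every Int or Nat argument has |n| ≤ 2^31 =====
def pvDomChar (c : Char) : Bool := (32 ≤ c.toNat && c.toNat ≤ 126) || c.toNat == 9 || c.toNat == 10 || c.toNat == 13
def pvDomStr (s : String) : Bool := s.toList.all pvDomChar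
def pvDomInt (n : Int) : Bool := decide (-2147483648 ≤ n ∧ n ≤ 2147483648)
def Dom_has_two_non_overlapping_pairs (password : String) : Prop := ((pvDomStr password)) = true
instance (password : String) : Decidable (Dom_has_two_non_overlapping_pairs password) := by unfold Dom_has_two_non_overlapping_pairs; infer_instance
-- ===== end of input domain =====

-- B replaces A's manual index state machine by one greedy non-overlapping pair scan
-- (Python: a single re.findall(r'([\s\S])\1') pass) followed by a distinct count; same cost, more idiomatic.


-- ===== PORT A =====
-- A's while loop: state (pairs, i); i only ever holds 0 ≤ i, and both indexing sites are
-- guarded by i + 1 < len, so password[i] / password[i+1] are read with getD (always in range).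
def pvLoopA (cs : List Char) (pairs : PySem.Set Char) (i : Nat) : PySem.Set Char :=
  if i + 1 < cs.length then
    if cs.getD i ' ' = cs.getD (i + 1) ' ' then
      pvLoopA cs (PySem.Set.add pairs (cs.getD i ' ')) (i + 2)
    else
      pvLoopA cs pairs (i + 1)
  else pairs
termination_by cs.length - i

def has_two_non_overlapping_pairs (password : String) : Bool :=
  decide (2 ≤ PySem.Set.len (pvLoopA password.toList PySem.Set.empty 0))

-- ===== PORT B =====
-- Hand port of re.findall(r'([\s\S])\1', password): the regex engine scans left to right and,
-- after a match of the two-character pattern, resumes AFTER it (greedy, non-overlapping) —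
-- exactly this structural recursion on the character list.
def pvFindPairs : List Char → List Char
  | c1 :: c2 :: rest => if c1 = c2 then c1 :: pvFindPairs rest else pvFindPairs (c2 :: rest)
  | _ => []

def has_two_non_overlapping_pairs_alt (password : String) : Bool :=
  decide (2 ≤ PySem.Set.len (PySem.Set.ofList (pvFindPairs password.toList)))

-- ===== PRECONDITION & SPEC =====
def Spec_has_two_non_overlapping_pairs (password : String) (out : Bool) : Prop := out = has_two_non_overlapping_pairs_alt password
instance (password : String) (out : Bool) : Decidable (Spec_has_two_non_overlapping_pairs password out) := by unfold Spec_has_two_non_overlapping_pairs; infer_instance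

-- ===== CLAIM (what is proved, stated in full; the proofs are below) =====
def Claim_equal_has_two_non_overlapping_pairs : Prop := ∀ (password : String), Dom_has_two_non_overlapping_pairs password → Spec_has_two_non_overlapping_pairs password (has_two_non_overlapping_pairs password)

-- ===== LEMMAS AND PROOFS =====

-- A's loop from index i accumulates, onto its running set, exactly the pairs B's scan finds
-- in the i-th suffix of the string.
theorem pvLoopA_eq_foldl (cs : List Char) (i : Nat) (pairs : PySem.Set Char) :
    pvLoopA cs pairs i = (pvFindPairs (cs.drop i)).foldl PySem.Set.add pairs := by
  rw [pvLoopA]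
  split
  · rename_i h
    have hi : i < cs.length := by omega
    have hdrop : cs.drop i = cs[i] :: cs[i+1] :: cs.drop (i + 2) := by
      rw [List.drop_eq_getElem_cons hi, List.drop_eq_getElem_cons h]
    have g1 : cs.getD i ' ' = cs[i] := List.getD_eq_getElem cs ' ' hi
    have g2 : cs.getD (i + 1) ' ' = cs[i+1] := List.getD_eq_getElem cs ' ' h
    rw [hdrop, pvFindPairs, g1, g2]
    split
    · rename_i heq
      rw [pvLoopA_eq_foldl cs (i + 2)]
      simp [List.foldl, heq]
    · rename_i hne
      rw [pvLoopA_eq_foldl cs (i + 1), List.drop_eq_getElem_cons h]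
  · rename_i h
    have : (cs.drop i).length ≤ 1 := by simp; omega
    match hd : cs.drop i with
    | [] => simp [pvFindPairs]
    | [c] => simp [pvFindPairs]
    | c1 :: c2 :: rest => rw [hd] at this; simp at this
termination_by cs.length - i

-- ===== VERDICT (by name: the statement is the Claim_ definition above) =====
theorem has_two_non_overlapping_pairs_spec : Claim_equal_has_two_non_overlapping_pairs := by
  intro password _
  unfold Spec_has_two_non_overlapping_pairs has_two_non_overlapping_pairs has_two_non_overlapping_pairs_alt
  rw [pvLoopA_eq_foldl, List.drop_zero, PySem.Set.ofList_eq_foldl]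
  rfl
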